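-- pv_equiv track=rewrite | github.com/daniel-reich/turbo-robot | 6brSyFwWnb9Msu7kX_7.py | pos_neg_sort
-- ===== SOURCE A (Python) =====
-- def pos_neg_sort(lst):
--   sorted_lst = sorted(filter(lambda n: n >= 0, lst))
--   s_i = 0
--   res = []
--   for i in range(len(lst)):
--     if lst[i] < 0:
--       res.append(lst[i])
--     else:
--       res.append(sorted_lst[s_i])
--       s_i += 1
--   return res
-- ===== SOURCE B (Python) =====
-- def pos_neg_sort(lst):
--   # selection sort over the non-negative slots: no library sort at all
--   work = list(lst)
--   res = []
--   while work:
--     x = work.pop(0)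
--     if x < 0:
--       res.append(x)
--     else:
--       m, k = x, -1
--       for j, v in enumerate(work):
--         if 0 <= v < m:
--           m, k = v, j
--       if k >= 0:
--         work[k] = x
--       res.append(m)
--   return res
-- ===== Notes on version B (the rewrite author's own statement) =====
-- stated objective: alternative
-- what changed: B never calls sorted(): it runs a selection sort over the non-negative slots, popping the head, scanning the remaining work list for the minimum non-negative value, emitting it and writing the popped head into the vacated slot, whereas A sorts the non-negatives once and replays them with a running counter.
import Mathlib
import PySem

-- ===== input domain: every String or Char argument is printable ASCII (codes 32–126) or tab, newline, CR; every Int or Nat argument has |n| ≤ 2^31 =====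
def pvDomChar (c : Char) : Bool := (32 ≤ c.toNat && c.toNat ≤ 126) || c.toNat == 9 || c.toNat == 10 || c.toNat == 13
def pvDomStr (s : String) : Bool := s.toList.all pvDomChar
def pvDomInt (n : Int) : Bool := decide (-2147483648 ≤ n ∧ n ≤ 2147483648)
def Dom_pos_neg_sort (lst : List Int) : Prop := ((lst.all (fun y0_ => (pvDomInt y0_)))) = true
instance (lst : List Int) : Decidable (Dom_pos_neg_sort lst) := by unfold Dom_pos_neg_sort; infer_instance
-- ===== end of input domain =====

-- B replaces A's sort-then-replay with a selection sort over the non-negative slots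
-- (no library sort); alternative algorithm, O(n^2) instead of O(n log n).

-- ===== PORT A =====
-- literal transliteration of A: sort the non-negatives, then rebuild with a running counter s_i.
-- pyGetD with default 0 is exact here: both reads are provably always in range where Python performs them.
def pos_neg_sort (lst : List Int) : List Int :=
  let sorted_lst := PySem.List.sorted (lst.filter (fun n => decide (n ≥ 0))) (fun x => x) false
  let st := (PySem.List.pyRange 0 lst.length 1).foldl
    (fun (st : Int × List Int) i =>
      if PySem.List.pyGetD lst i 0 < 0 then
        (st.1, st.2 ++ [PySem.List.pyGetD lst i 0])
      else
        (st.1 + 1, st.2 ++ [PySem.List.pyGetD sorted_lst st.1 0]))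
    ((0 : Int), ([] : List Int))
  st.2

-- ===== PORT B =====
-- literal transliteration of B: the inner for-loop over enumerate(work) that selects the
-- minimum non-negative value (and its index) among x and the remaining work list
def pvSelect (work : List Int) (x : Int) : Int × Int :=
  (PySem.List.enumerate work 0).foldl
    (fun (mk : Int × Int) jv => if 0 ≤ jv.2 ∧ jv.2 < mk.1 then (jv.2, jv.1) else mk)
    (x, -1)

-- the while loop: pop the head x; negatives pass through; otherwise emit the selected
-- minimum m and write x into the vacated slot k (pySetD is exact: k is in range when 0 ≤ k)
def pvLoop (work : List Int) (res : List Int) : List Int :=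
  match work with
  | [] => res
  | x :: rest =>
    if x < 0 then pvLoop rest (res ++ [x])
    else
      let mk := pvSelect rest x
      if 0 ≤ mk.2 then pvLoop (PySem.List.pySetD rest mk.2 x) (res ++ [mk.1])
      else pvLoop rest (res ++ [mk.1])
  termination_by work.length
  decreasing_by
  · simp
  · simp [PySem.List.length_pySetD]
  · simp

def pos_neg_sort_alt (lst : List Int) : List Int :=
  pvLoop lst []

-- ===== PRECONDITION & SPEC =====
def Spec_pos_neg_sort (lst : List Int) (out : List Int) : Prop := out = pos_neg_sort_alt lst
instance (lst : List Int) (out : List Int) : Decidable (Spec_pos_neg_sort lst out) := by unfold Spec_pos_neg_sort; infer_instance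

-- ===== CLAIM (what is proved, stated in full; the proofs are below) =====
def Claim_equal_pos_neg_sort : Prop := ∀ (lst : List Int), Dom_pos_neg_sort lst → Spec_pos_neg_sort lst (pos_neg_sort lst)

-- ===== LEMMAS AND PROOFS =====

-- common functional description: replace the non-negatives of the list, left to right, by the queue q
def pvMerge : List Int → List Int → List Int
  | [], _ => []
  | x :: xs, q =>
    if x < 0 then x :: pvMerge xs q
    else match q with
      | [] => []
      | y :: ys => y :: pvMerge xs ys

-- A's loop: running down `rest` (the part of lst from index pre.length) with counter si appends pvMerge
theorem loopA (lst sorted : List Int) :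
    ∀ (rest pre : List Int) (si : Nat) (acc : List Int),
    lst = pre ++ rest →
    si + rest.countP (fun x => decide (0 ≤ x)) ≤ sorted.length →
    (((PySem.List.pyRange (pre.length) (lst.length) 1).foldl
      (fun (st : Int × List Int) i =>
        if PySem.List.pyGetD lst i 0 < 0 then
          (st.1, st.2 ++ [PySem.List.pyGetD lst i 0])
        else
          (st.1 + 1, st.2 ++ [PySem.List.pyGetD sorted st.1 0]))
      ((si : Int), acc)).2)
    = acc ++ pvMerge rest (sorted.drop si) := by
  intro rest
  induction rest with
  | nil =>
    intro pre si acc hl h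
    rw [PySem.List.pyRange_one_eq_nil (by simp [hl])]
    simp [pvMerge]
  | cons x xs ih =>
    intro pre si acc hl h
    rw [PySem.List.pyRange_one_cons (by simp [hl])]
    rw [List.foldl_cons]
    have hget : PySem.List.pyGetD lst ((pre.length : Int)) 0 = x := by
      simp [hl, PySem.List.pyGetD_natCast, List.getD_eq_getElem?_getD]
    simp only [hget]
    by_cases hx : x < 0
    · rw [if_pos hx]
      have h' : si + xs.countP (fun x => decide (0 ≤ x)) ≤ sorted.length := by
        simp only [List.countP_cons] at h; omega
      have := ih (pre ++ [x]) si (acc ++ [x]) (by simp [hl]) h'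
      simp only [List.length_append, List.length_cons, List.length_nil] at this
      push_cast at this ⊢
      rw [this]
      simp [pvMerge, hx]
    · rw [if_neg hx]
      have hx0 : (0 : Int) ≤ x := by omega
      have hsi : si < sorted.length := by
        simp [hx0] at h; omega
      have hgs : PySem.List.pyGetD sorted ((si : Int)) 0 = sorted[si] := by
        simp [PySem.List.pyGetD_natCast, List.getD_eq_getElem?_getD, List.getElem?_eq_getElem hsi]
      have h' : (si + 1) + xs.countP (fun x => decide (0 ≤ x)) ≤ sorted.length := by
        simp [hx0] at h; omega
      have := ih (pre ++ [x]) (si + 1) (acc ++ [sorted[si]]) (by simp [hl]) h'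
      simp only [List.length_append, List.length_cons, List.length_nil] at this
      push_cast at this ⊢
      rw [hgs, this]
      rw [List.drop_eq_getElem_cons hsi]
      simp [pvMerge, hx]

-- characterisation of the selection fold: the result is (a lower bound of the non-negatives,
-- its index), or the untouched start pair
theorem sel_go (rest : List Int) : ∀ (s m k : Int) (r : Int × Int),
    r = (PySem.List.enumerate rest s).foldl
      (fun (mk : Int × Int) jv => if 0 ≤ jv.2 ∧ jv.2 < mk.1 then (jv.2, jv.1) else mk) (m, k) →
    r.1 ≤ m ∧ (∀ v ∈ rest, 0 ≤ v → r.1 ≤ v) ∧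
    (r = (m, k) ∨ ∃ j : Nat, j < rest.length ∧ r.2 = s + j ∧ rest[j]? = some r.1 ∧ 0 ≤ r.1) := by
  induction rest with
  | nil => intro s m k r hr; simp [PySem.List.enumerate_nil] at hr; simp [hr]
  | cons v tl ih =>
    intro s m k r hr
    rw [PySem.List.enumerate_cons, List.foldl_cons] at hr
    by_cases hv : 0 ≤ v ∧ v < m
    · rw [if_pos hv] at hr
      obtain ⟨h1, h2, h3⟩ := ih (s + 1) v s r hr
      refine ⟨by omega, ?_, ?_⟩
      · intro w hw hw0
        rcases List.mem_cons.mp hw with hw | hw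
        · omega
        · exact h2 w hw hw0
      · right
        rcases h3 with h3 | ⟨j, hj, hj2, hj3, hj4⟩
        · exact ⟨0, by simp, by simp [h3], by simp [h3, hv.1]⟩
        · exact ⟨j + 1, by simpa using hj, by omega, by simpa using hj3, hj4⟩
    · rw [if_neg hv] at hr
      obtain ⟨h1, h2, h3⟩ := ih (s + 1) m k r hr
      refine ⟨h1, ?_, ?_⟩
      · intro w hw hw0
        rcases List.mem_cons.mp hw with hw | hw
        · subst hw; omega
        · exact h2 w hw hw0
      · rcases h3 with h3 | ⟨j, hj, hj2, hj3, hj4⟩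
        · exact Or.inl h3
        · exact Or.inr ⟨j + 1, by simpa using hj, by omega, by simpa using hj3, hj4⟩

-- writing a non-negative value over a non-negative slot does not change pvMerge
theorem pvMerge_set : ∀ (rest : List Int) (j : Nat) (x : Int) (q : List Int),
    rest[j]?.any (fun w => decide (0 ≤ w)) → 0 ≤ x →
    pvMerge (rest.set j x) q = pvMerge rest q := by
  intro rest
  induction rest with
  | nil => intro j x q h hx; simp at h
  | cons a tl ih =>
    intro j x q h hx
    cases j with
    | zero =>
      simp at h
      simp only [List.set_cons_zero, pvMerge, if_neg (by omega : ¬ x < 0), if_neg (by omega : ¬ a < 0)]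
    | succ j' =>
      simp only [List.set_cons_succ, pvMerge]
      simp only [List.getElem?_cons_succ] at h
      by_cases ha : a < 0
      · simp only [if_pos ha, ih j' x q h hx]
      · simp only [if_neg ha]
        cases q with
        | nil => rfl
        | cons y ys => simp [ih j' x ys h hx]

-- the selection loop computes pvMerge with the sorted non-negatives
theorem pvLoop_merge : ∀ (n : Nat) (work res : List Int), work.length ≤ n →
    pvLoop work res
      = res ++ pvMerge work (PySem.List.sorted (work.filter (fun v => decide (v ≥ 0))) (fun x => x) false) := by
  intro n
  induction n with
  | zero =>
    intro work res h
    have : work = [] := by cases work <;> simp_all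
    subst this; simp [pvLoop, pvMerge]
  | succ n ih =>
    intro work res h
    match work with
    | [] => simp [pvLoop, pvMerge]
    | x :: rest =>
      have hlen : rest.length ≤ n := by simp at h; omega
      by_cases hx : x < 0
      · rw [pvLoop, if_pos hx, ih rest (res ++ [x]) hlen]
        have hf : (x :: rest).filter (fun v => decide (v ≥ 0)) = rest.filter (fun v => decide (v ≥ 0)) := by
          simp [show ¬ x ≥ 0 by omega]
        rw [hf]
        simp [pvMerge, hx]
      · have hx0 : (0 : Int) ≤ x := by omega
        have hf : (x :: rest).filter (fun v => decide (v ≥ 0)) = x :: rest.filter (fun v => decide (v ≥ 0)) := by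
          simp [show x ≥ 0 by omega]
        obtain ⟨h1, h2, h3⟩ := sel_go rest 0 x (-1) (pvSelect rest x) rfl
        rcases h3 with heq | ⟨j, hj, hj2, hj3, hj4⟩
        · -- k = -1 : head x is already minimal; work list unchanged
          rw [pvLoop, if_neg hx, if_neg (by rw [heq]; omega), ih rest (res ++ [(pvSelect rest x).1]) hlen]
          have hm : (pvSelect rest x).1 = x := by rw [heq]
          rw [hm] at h2
          have hS : PySem.List.sorted ((x :: rest).filter (fun v => decide (v ≥ 0))) (fun y => y) false
              = x :: PySem.List.sorted (rest.filter (fun v => decide (v ≥ 0))) (fun y => y) false := by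
            apply PySem.List.sorted_id_eq_of_perm_of_pairwise
            · rw [hf]
              exact List.Perm.cons x (PySem.List.sorted_perm _ _ _)
            · rw [List.pairwise_cons]
              refine ⟨?_, ?_⟩
              · intro b hb
                rw [PySem.List.mem_sorted] at hb
                have hb' := List.of_mem_filter hb
                simp at hb'
                exact h2 b (List.mem_of_mem_filter hb) (by omega)
              · have := PySem.List.sorted_pairwise (rest.filter (fun v => decide (v ≥ 0))) (fun y : Int => y) 
                simpa using this
          rw [hS]
          simp [pvMerge, hx, hm]
        · -- k = j ≥ 0 : emit m = rest[j], write x into slot j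
          have hkj : (pvSelect rest x).2 = (j : Int) := by omega
          rw [pvLoop, if_neg hx, if_pos (by rw [hkj]; positivity)]
          rw [hkj, PySem.List.pySetD_natCast]
          rw [ih (rest.set j x) (res ++ [(pvSelect rest x).1]) (by simpa using hlen)]
          set m := (pvSelect rest x).1 with hmdef
          set W := rest.set j x with hW
          -- sorted (filter (x :: rest)) = m :: sorted (filter W)
          have hjget : rest[j] = m := by
            have := hj3; rw [List.getElem?_eq_getElem hj] at this; simpa using this
          have hrest_split : rest = rest.take j ++ rest[j] :: rest.drop (j + 1) := by
            conv_lhs => rw [← List.take_append_drop j rest, List.drop_eq_getElem_cons hj]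
          have hperm : (m :: (W.filter (fun v => decide (v ≥ 0)))).Perm
              ((x :: rest).filter (fun v => decide (v ≥ 0))) := by
            rw [hf]
            have hWsplit : W = rest.take j ++ x :: rest.drop (j + 1) := by
              rw [hW, List.set_eq_take_append_cons_drop, if_pos hj]
            rw [hWsplit, List.filter_append, List.filter_cons]
            conv_rhs => rw [hrest_split]
            rw [List.filter_append, List.filter_cons]
            simp only [hjget, if_pos (by simpa using hj4 : decide (m ≥ 0) = true),
              if_pos (by simp; omega : decide (x ≥ 0) = true)]
            exact (List.Perm.cons m List.perm_middle).trans
              ((List.Perm.swap x m _).trans (List.Perm.cons x List.perm_middle.symm))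
          have hS : PySem.List.sorted ((x :: rest).filter (fun v => decide (v ≥ 0))) (fun y => y) false
              = m :: PySem.List.sorted (W.filter (fun v => decide (v ≥ 0))) (fun y => y) false := by
            apply PySem.List.sorted_id_eq_of_perm_of_pairwise
            · exact (List.Perm.cons m (PySem.List.sorted_perm _ _ _)).trans hperm
            · rw [List.pairwise_cons]
              refine ⟨?_, ?_⟩
              · intro b hb
                rw [PySem.List.mem_sorted] at hb
                have hb0 : (0:Int) ≤ b := by
                  have := List.of_mem_filter hb; simp at this; omega
                have hbmem := List.mem_of_mem_filter hb
                rcases List.mem_or_eq_of_mem_set hbmem with hbr | hbx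
                · exact h2 b hbr hb0
                · subst hbx; omega
              · have := PySem.List.sorted_pairwise (W.filter (fun v => decide (v ≥ 0))) (fun y : Int => y)
                simpa using this
          rw [hS]
          have hmerge : pvMerge rest (PySem.List.sorted (W.filter (fun v => decide (v ≥ 0))) (fun y => y) false)
              = pvMerge W (PySem.List.sorted (W.filter (fun v => decide (v ≥ 0))) (fun y => y) false) := by
            refine (pvMerge_set rest j x _ ?_ hx0).symm
            rw [List.getElem?_eq_getElem hj, hjget]
            simpa using hj4
          simp [pvMerge, hx, hmerge]

-- ===== VERDICT (by name: the statement is the Claim_ definition above) =====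
theorem pos_neg_sort_spec : Claim_equal_pos_neg_sort := by
  intro lst _
  unfold Spec_pos_neg_sort pos_neg_sort pos_neg_sort_alt
  dsimp only
  have hlen : (PySem.List.sorted (lst.filter (fun n => decide (n ≥ 0))) (fun x => x) false).length
      = lst.countP (fun x => decide (0 ≤ x)) := by
    simp [PySem.List.length_sorted, List.countP_eq_length_filter]
  have hA := loopA lst (PySem.List.sorted (lst.filter (fun n => decide (n ≥ 0))) (fun x => x) false)
    lst [] 0 [] (by simp) (by simp [hlen])
  have hB := pvLoop_merge lst.length lst [] (le_refl _)
  simp only [List.length_nil, Nat.cast_zero, List.nil_append, List.drop_zero] at hA hB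
  rw [hA, hB]
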